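-- pv_equiv track=rewrite | github.com/volcengine/verl | atropos/environments/intern_bootcamp/internbootcamp_lib/internbootcamp/bootcamp/ckingspath/ckingspath.py | _generate_king_path
-- ===== SOURCE A (Python) =====
-- def _generate_king_path(start, end):
--     """生成国王移动的合法路径"""
--     path = [start]
--     x, y = start
--     tx, ty = end
--
--     while (x, y) != (tx, ty):
--         dx = 0 if x == tx else (1 if tx > x else -1)
--         dy = 0 if y == ty else (1 if ty > y else -1)
--         x += dx
--         y += dy
--         path.append((x, y))
--     return path
-- ===== SOURCE B (Python) =====
-- def _generate_king_path(start, end):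
--     """生成国王移动的合法路径"""
--     x0, y0 = start
--     tx, ty = end
--     ax = abs(tx - x0)
--     ay = abs(ty - y0)
--     sx = (tx > x0) - (tx < x0)
--     sy = (ty > y0) - (ty < y0)
--     L = max(ax, ay)
--     return [(x0 + sx * min(i, ax), y0 + sy * min(i, ay)) for i in range(L + 1)]
-- ===== Notes on version B (the rewrite author's own statement) =====
-- stated objective: alternative
-- what changed: Replaces the incremental while-loop that threads (x,y) state with a closed-form formula: each path point is derived directly from its step index i via per-axis sign and a saturating clamp min(i, axis_distance).
import Mathlib
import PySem

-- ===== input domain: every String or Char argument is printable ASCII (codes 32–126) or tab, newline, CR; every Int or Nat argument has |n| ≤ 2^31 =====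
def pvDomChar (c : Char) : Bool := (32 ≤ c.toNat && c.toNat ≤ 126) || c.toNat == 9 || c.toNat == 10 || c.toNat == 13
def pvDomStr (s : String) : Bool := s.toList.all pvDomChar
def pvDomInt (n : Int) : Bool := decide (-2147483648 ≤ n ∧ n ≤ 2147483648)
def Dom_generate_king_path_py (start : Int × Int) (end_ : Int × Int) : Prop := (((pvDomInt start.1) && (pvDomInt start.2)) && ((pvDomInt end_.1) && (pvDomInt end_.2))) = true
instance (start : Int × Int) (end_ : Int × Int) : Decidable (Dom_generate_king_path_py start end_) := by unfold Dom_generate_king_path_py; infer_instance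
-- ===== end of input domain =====

-- B replaces A's stateful while-loop by a closed-form index formula (sign × saturating clamp); same cost, different decomposition.

-- ===== PORT A =====
-- dx/dy expression of A's loop body: 0 if x == tx else (1 if tx > x else -1)
def kingStep (x tx : Int) : Int := if x = tx then 0 else if tx > x then 1 else -1

-- the while loop of A, accumulating the appended points; fuel is only a
-- totality guard (it equals the Chebyshev distance, the exact number of iterations)
def kingLoop (fuel : Nat) (tx ty x y : Int) : List (Int × Int) :=
  match fuel with
  | 0 => []
  | fuel + 1 =>
    if x = tx ∧ y = ty then []
    else
      (x + kingStep x tx, y + kingStep y ty) ::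
        kingLoop fuel tx ty (x + kingStep x tx) (y + kingStep y ty)

def generate_king_path_py (start : Int × Int) (end_ : Int × Int) : List (Int × Int) :=
  start :: kingLoop (max (end_.1 - start.1).natAbs (end_.2 - start.2).natAbs)
    end_.1 end_.2 start.1 start.2

-- ===== PORT B =====
-- (tx > x0) - (tx < x0) of Source B
def kingSgn (x0 tx : Int) : Int := (if tx > x0 then 1 else 0) - (if tx < x0 then 1 else 0)

def generate_king_path_py_alt (start : Int × Int) (end_ : Int × Int) : List (Int × Int) :=
  let x0 := start.1
  let y0 := start.2
  let tx := end_.1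
  let ty := end_.2
  let ax := |tx - x0|
  let ay := |ty - y0|
  let sx := kingSgn x0 tx
  let sy := kingSgn y0 ty
  let L := max ax ay
  (PySem.List.pyRange 0 (L + 1) 1).map (fun i => (x0 + sx * min i ax, y0 + sy * min i ay))

-- ===== PRECONDITION & SPEC =====
def Spec_generate_king_path_py (start : Int × Int) (end_ : Int × Int) (out : List (Int × Int)) : Prop := out = generate_king_path_py_alt start end_
instance (start : Int × Int) (end_ : Int × Int) (out : List (Int × Int)) : Decidable (Spec_generate_king_path_py start end_ out) := by unfold Spec_generate_king_path_py; infer_instance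

-- ===== CLAIM (what is proved, stated in full; the proofs are below) =====
def Claim_equal_generate_king_path_py : Prop := ∀ (start : Int × Int) (end_ : Int × Int), Dom_generate_king_path_py start end_ → Spec_generate_king_path_py start end_ (generate_king_path_py start end_)

-- ===== LEMMAS AND PROOFS =====

-- the measure drops by exactly one on each loop iteration
lemma king_meas (x y tx ty : Int) (h : ¬(x = tx ∧ y = ty)) :
    max (tx - (x + kingStep x tx)).natAbs (ty - (y + kingStep y ty)).natAbs + 1
      = max (tx - x).natAbs (ty - y).natAbs := by
  simp only [kingStep]; split_ifs <;> omega

-- first step of the loop in closed form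
lemma king_coord0 (x tx : Int) : x + kingStep x tx = x + kingSgn x tx * min 1 |tx - x| := by
  simp only [kingStep, kingSgn, Int.abs_eq_natAbs]; split_ifs <;> omega

-- shifting the start point by one step shifts the index by one
lemma king_coordStep (x tx k : Int) (hk : 0 ≤ k) :
    (x + kingStep x tx) + kingSgn (x + kingStep x tx) tx * min (k + 1) |tx - (x + kingStep x tx)|
      = x + kingSgn x tx * min (k + 2) |tx - x| := by
  simp only [kingStep, kingSgn, Int.abs_eq_natAbs]; split_ifs <;> omega

-- the loop in closed form
lemma king_loop_eq (n : ℕ) : ∀ x y tx ty : Int,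
    max (tx - x).natAbs (ty - y).natAbs = n →
    kingLoop n tx ty x y = (List.range n).map
      (fun (k : ℕ) => (x + kingSgn x tx * min ((k : Int) + 1) |tx - x|,
                 y + kingSgn y ty * min ((k : Int) + 1) |ty - y|)) := by
  induction n with
  | zero =>
      intro x y tx ty h
      simp [kingLoop]
  | succ n ih =>
      intro x y tx ty h
      have hne : ¬(x = tx ∧ y = ty) := by
        intro ⟨h1, h2⟩; subst h1; subst h2; simp at h
      simp only [kingLoop, if_neg hne]

      have hm : max (tx - (x + kingStep x tx)).natAbs (ty - (y + kingStep y ty)).natAbs = n := by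
        have := king_meas x y tx ty hne; omega
      rw [ih _ _ _ _ hm, List.range_succ_eq_map, List.map_cons, List.map_map]
      refine congrArg₂ _ ?_ ?_
      · simp only [Nat.cast_zero, zero_add]
        exact Prod.ext (king_coord0 x tx) (king_coord0 y ty)
      · refine List.map_congr_left (fun k _ => ?_)
        simp only [Function.comp_apply, Nat.cast_succ]
        refine Prod.ext ?_ ?_
        · have := king_coordStep x tx (k : Int) (by positivity); simpa [add_assoc, one_add_one_eq_two] using this
        · have := king_coordStep y ty (k : Int) (by positivity); simpa [add_assoc, one_add_one_eq_two] using this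

-- B in the same closed form
lemma king_alt_eq (x0 y0 tx ty : Int) :
    generate_king_path_py_alt (x0, y0) (tx, ty) = (x0, y0) ::
      (List.range (max (tx - x0).natAbs (ty - y0).natAbs)).map
        (fun (k : ℕ) => (x0 + kingSgn x0 tx * min ((k : Int) + 1) |tx - x0|,
                   y0 + kingSgn y0 ty * min ((k : Int) + 1) |ty - y0|)) := by
  simp only [generate_king_path_py_alt]
  rw [PySem.List.pyRange_one]
  have hN : (max |tx - x0| |ty - y0| + 1 - 0).toNat
      = max (tx - x0).natAbs (ty - y0).natAbs + 1 := by
    simp only [Int.abs_eq_natAbs]; omega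
  rw [hN, List.range_succ_eq_map, List.map_cons, List.map_cons, List.map_map, List.map_map]
  refine congrArg₂ _ ?_ ?_
  · simp
  · refine List.map_congr_left (fun k _ => ?_)
    simp [Function.comp_apply, Nat.cast_succ, add_comm]

-- ===== VERDICT (by name: the statement is the Claim_ definition above) =====
theorem generate_king_path_py_spec : Claim_equal_generate_king_path_py := by
  intro start end_ _
  unfold Spec_generate_king_path_py
  obtain ⟨x0, y0⟩ := start
  obtain ⟨tx, ty⟩ := end_
  rw [king_alt_eq]
  simp only [generate_king_path_py]
  rw [king_loop_eq (max (tx - x0).natAbs (ty - y0).natAbs) x0 y0 tx ty rfl]
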